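-- pv_equiv track=rewrite | github.com/Tibblue/PLC | SPLN/SPLN_mari_lena_danny/SPLN-master/Pratica/aulas/aula-13/tagger.py | fuse_nprop
-- ===== SOURCE A (Python) =====
-- def fuse_nprop(tagged_line):
--     name = []
--     line = []
--     for (w,t) in tagged_line:
--         if t == 'NPROP':
--             name.append(w)
--
--         elif t == 'UNKNOWN' and w.istitle():
--             name.append(w)
--
--         else:
--             if name:
--                 n = '_'.join(name)
--                 line.append((n, 'NENT'))
--                 name = []
--             line.append((w,t))
--
--     if name:
--         line.append(('_'.join(name), 'NENT'))
--
--     return line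
-- ===== SOURCE B (Python) =====
-- def fuse_nprop(tagged_line):
--     def is_name(pair):
--         w, t = pair
--         return t == 'NPROP' or (t == 'UNKNOWN' and w.istitle())
--
--     out = []
--     i = 0
--     n = len(tagged_line)
--     while i < n:
--         if is_name(tagged_line[i]):
--             j = i + 1
--             while j < n and is_name(tagged_line[j]):
--                 j += 1
--             out.append(('_'.join(w for (w, _) in tagged_line[i:j]), 'NENT'))
--             i = j
--         else:
--             out.append(tagged_line[i])
--             i += 1
--     return out
-- ===== Notes on version B (the rewrite author's own statement) =====
-- stated objective: alternative
-- what changed: Replaces A's accumulate-and-flush loop (pending-name buffer flushed on each non-name token and at the end) with a run-grouping scan: find each maximal run of name tokens with an inner scan and emit the joined entity at once, copying non-name tokens through.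
import Mathlib
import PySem

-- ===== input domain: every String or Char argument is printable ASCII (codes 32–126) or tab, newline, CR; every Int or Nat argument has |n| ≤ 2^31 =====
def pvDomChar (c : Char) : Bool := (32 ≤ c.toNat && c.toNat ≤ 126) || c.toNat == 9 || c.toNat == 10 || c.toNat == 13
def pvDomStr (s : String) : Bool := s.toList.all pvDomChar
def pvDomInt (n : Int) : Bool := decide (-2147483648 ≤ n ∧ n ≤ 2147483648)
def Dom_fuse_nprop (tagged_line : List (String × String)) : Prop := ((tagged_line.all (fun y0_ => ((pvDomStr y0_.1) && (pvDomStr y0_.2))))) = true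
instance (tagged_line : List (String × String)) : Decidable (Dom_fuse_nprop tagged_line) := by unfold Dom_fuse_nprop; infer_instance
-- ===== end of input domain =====

-- B replaces A's accumulate-and-flush loop by a run-grouping scan (find each maximal
-- name run with an inner scan and emit it at once); objective: alternative decomposition.

-- shared helper: exact port of str.istitle() on the ASCII domain
-- (state machine: cased = seen a cased char, prev = previous char was cased)
def istitleAux : List Char → Bool → Bool → Bool
  | [], cased, _ => cased
  | c :: cs, _cased, prev =>
    if PySem.Chars.isupper c then
      if prev then false else istitleAux cs true true
    else if PySem.Chars.islower c then
      if prev then istitleAux cs true true else false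
    else istitleAux cs _cased false

def pyIstitle (s : String) : Bool := istitleAux s.toList false false

-- ===== PORT A =====
def fuse_nprop (tagged_line : List (String × String)) : List (String × String) :=
  let st := tagged_line.foldl
    (fun (st : List String × List (String × String)) wt =>
      let name := st.1; let line := st.2
      let w := wt.1; let t := wt.2
      if t == "NPROP" then (name ++ [w], line)
      else if t == "UNKNOWN" && pyIstitle w then (name ++ [w], line)
      else if name ≠ [] then
        ([], line ++ [(PySem.Str.join "_" name, "NENT"), (w, t)])
      else (name, line ++ [(w, t)]))
    ([], [])
  if st.1 ≠ [] then st.2 ++ [(PySem.Str.join "_" st.1, "NENT")] else st.2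

-- ===== PORT B =====
def isName (p : String × String) : Bool :=
  p.2 == "NPROP" || (p.2 == "UNKNOWN" && pyIstitle p.1)

def fuse_nprop_alt : List (String × String) → List (String × String)
  | [] => []
  | p :: rest =>
    if isName p then
      (PySem.Str.join "_" ((p :: rest.takeWhile isName).map (·.1)), "NENT")
        :: fuse_nprop_alt (rest.dropWhile isName)
    else
      p :: fuse_nprop_alt rest
  termination_by l => l.length
  decreasing_by
    · simpa using Nat.lt_succ_of_le (List.length_dropWhile_le isName rest)
    · simp

-- ===== PRECONDITION & SPEC =====
def Spec_fuse_nprop (tagged_line : List (String × String)) (out : List (String × String)) : Prop := out = fuse_nprop_alt tagged_line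
instance (tagged_line : List (String × String)) (out : List (String × String)) : Decidable (Spec_fuse_nprop tagged_line out) := by unfold Spec_fuse_nprop; infer_instance

-- ===== CLAIM (what is proved, stated in full; the proofs are below) =====
def Claim_equal_fuse_nprop : Prop := ∀ (tagged_line : List (String × String)), Dom_fuse_nprop tagged_line → Spec_fuse_nprop tagged_line (fuse_nprop tagged_line)

-- ===== LEMMAS AND PROOFS =====

-- B's result with a pending run of already-collected name words in front
def altWith (name : List String) : List (String × String) → List (String × String)
  | [] => if name = [] then [] else [(PySem.Str.join "_" name, "NENT")]
  | p :: rest =>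
    if isName p then altWith (name ++ [p.1]) rest
    else
      (if name = [] then [] else [(PySem.Str.join "_" name, "NENT")])
        ++ p :: altWith [] rest

lemma altWith_eq (l : List (String × String)) : ∀ name : List String,
    altWith name l =
      if name = [] then fuse_nprop_alt l
      else (PySem.Str.join "_" (name ++ (l.takeWhile isName).map (·.1)), "NENT")
        :: fuse_nprop_alt (l.dropWhile isName) := by
  induction l with
  | nil =>
    intro name
    by_cases h : name = [] <;> simp [altWith, fuse_nprop_alt, h]
  | cons p rest ih =>
    intro name
    by_cases hp : isName p = true
    · rw [altWith, if_pos hp, ih]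
      have hne : name ++ [p.1] ≠ [] := by simp
      rw [if_neg hne]
      by_cases h : name = []
      · subst h
        rw [if_pos rfl, fuse_nprop_alt, if_pos hp]
        simp
      · rw [if_neg h]
        simp [hp]
    · rw [altWith, if_neg hp, ih [], if_pos rfl]
      by_cases h : name = []
      · simp [h, fuse_nprop_alt, hp]
      · rw [if_neg h]
        simp [hp, fuse_nprop_alt, h]

-- A's loop + final flush equals line ++ altWith name (rest of the input)
lemma loop_eq (l : List (String × String)) :
    ∀ (name : List String) (line : List (String × String)),
    (let st := l.foldl
      (fun (st : List String × List (String × String)) wt =>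
        let name := st.1; let line := st.2
        let w := wt.1; let t := wt.2
        if t == "NPROP" then (name ++ [w], line)
        else if t == "UNKNOWN" && pyIstitle w then (name ++ [w], line)
        else if name ≠ [] then
          ([], line ++ [(PySem.Str.join "_" name, "NENT"), (w, t)])
        else (name, line ++ [(w, t)]))
      (name, line)
     if st.1 ≠ [] then st.2 ++ [(PySem.Str.join "_" st.1, "NENT")] else st.2)
    = line ++ altWith name l := by
  induction l with
  | nil =>
    intro name line
    by_cases h : name = [] <;> simp [altWith, h]
  | cons p rest ih =>
    intro name line
    by_cases hp : isName p = true
    · have hor : (p.2 == "NPROP") = true ∨ (p.2 == "UNKNOWN" && pyIstitle p.1) = true := by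
        have h := hp; unfold isName at h; exact Bool.or_eq_true_iff.mp h
      by_cases h : (p.2 == "NPROP") = true
      · simp only [List.foldl_cons, h, if_true]
        rw [ih (name ++ [p.1]) line, altWith, if_pos hp]
      · have h2 : (p.2 == "UNKNOWN" && pyIstitle p.1) = true := hor.resolve_left h
        simp only [Bool.not_eq_true] at h
        simp only [List.foldl_cons, h, h2, Bool.false_eq_true, if_false, if_true]
        rw [ih (name ++ [p.1]) line, altWith, if_pos hp]
    · have hb : isName p = false := by simpa using hp
      unfold isName at hb
      obtain ⟨h1, h2⟩ := Bool.or_eq_false_iff.mp hb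
      by_cases h : name = []
      · subst h
        simp only [List.foldl_cons, h1, h2, Bool.false_eq_true, if_false, ne_eq,
          not_true_eq_false]
        rw [ih [] (line ++ [(p.1, p.2)]), altWith, if_neg hp, if_pos rfl]
        simp
      · simp only [List.foldl_cons, h1, h2, Bool.false_eq_true, if_false, ne_eq, h,
          not_false_eq_true, reduceIte]
        rw [ih [] (line ++ [(PySem.Str.join "_" name, "NENT"), (p.1, p.2)]),
          altWith, if_neg hp, if_neg h]
        simp

-- ===== VERDICT (by name: the statement is the Claim_ definition above) =====
theorem fuse_nprop_spec : Claim_equal_fuse_nprop := by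
  intro l _
  show fuse_nprop l = fuse_nprop_alt l
  have := loop_eq l [] []
  simp only [fuse_nprop]
  rw [this, altWith_eq l [], if_pos rfl]
  simp
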